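-- pv_equiv track=rewrite | github.com/HarshitaKhare28/mba_career_counsellor | chatbot.py | _is_casual_message
-- ===== SOURCE A (Python) =====
-- def _is_casual_message(message: str) -> bool:
--     """
--     Detect if the message is a casual/social interaction rather than MBA-related query
--     """
--     message_lower = message.lower().strip()
--
--     # Common greetings and social expressions
--     casual_patterns = [
--         # Greetings
--         'hello', 'hi', 'hey', 'good morning', 'good afternoon', 'good evening',
--         # Thanks and appreciation
--         'thank you', 'thanks', 'thank u', 'thx', 'appreciate', 'grateful',
--         # Politeness
--         'please', 'excuse me', 'sorry', 'pardon',
--         # Farewells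
--         'bye', 'goodbye', 'see you', 'take care', 'have a good day',
--         # General responses
--         'ok', 'okay', 'alright', 'sure', 'yes', 'no', 'maybe',
--         # Simple acknowledgments
--         'i see', 'understood', 'got it', 'makes sense'
--     ]
--
--     # Check for exact matches or if message starts with these patterns
--     for pattern in casual_patterns:
--         if message_lower == pattern or message_lower.startswith(pattern + ' ') or message_lower.startswith(pattern + ','):
--             return True
--
--     # Check for very short messages that are likely casual
--     if len(message_lower.split()) <= 2 and any(word in message_lower for word in casual_patterns):
--         return True
--
--     return False
-- ===== SOURCE B (Python) =====
-- _CASUAL = frozenset([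
--     'hello', 'hi', 'hey', 'good morning', 'good afternoon', 'good evening',
--     'thank you', 'thanks', 'thank u', 'thx', 'appreciate', 'grateful',
--     'please', 'excuse me', 'sorry', 'pardon',
--     'bye', 'goodbye', 'see you', 'take care', 'have a good day',
--     'ok', 'okay', 'alright', 'sure', 'yes', 'no', 'maybe',
--     'i see', 'understood', 'got it', 'makes sense'
-- ])
--
--
-- def _is_casual_message(message: str) -> bool:
--     m = message.lower().strip()
--     n = len(m)
--     # Phase 1 by positions: a casual opener ends exactly at a boundary
--     # (end of string, space or comma), so check each boundary's prefix
--     # against the pattern set instead of trying every pattern.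
--     if any((i == n or m[i] in ' ,') and m[:i] in _CASUAL for i in range(n + 1)):
--         return True
--     return len(m.split()) <= 2 and any(word in m for word in _CASUAL)
-- ===== Notes on version B (the rewrite author's own statement) =====
-- stated objective: alternative
-- what changed: Phase 1 is inverted: instead of testing every casual pattern for equality/startswith against the message, B scans the message's boundary positions (end of string, space, comma) once and looks each boundary prefix up in a frozenset of the patterns; the short-message substring fallback is kept.
import Mathlib
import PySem

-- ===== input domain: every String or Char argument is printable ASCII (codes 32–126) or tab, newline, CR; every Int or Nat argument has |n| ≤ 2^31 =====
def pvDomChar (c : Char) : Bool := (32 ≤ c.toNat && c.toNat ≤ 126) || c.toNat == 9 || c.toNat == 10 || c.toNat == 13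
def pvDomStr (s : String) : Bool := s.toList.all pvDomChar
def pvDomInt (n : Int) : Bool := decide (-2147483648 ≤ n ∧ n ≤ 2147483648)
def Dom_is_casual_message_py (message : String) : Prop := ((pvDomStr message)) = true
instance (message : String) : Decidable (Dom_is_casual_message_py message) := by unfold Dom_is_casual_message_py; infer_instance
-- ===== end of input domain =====

-- B replaces A's per-pattern prefix loop by a single scan over the boundary
-- positions of the message with a set lookup of each boundary prefix (alternative
-- decomposition; phase 2, the short-message substring fallback, is kept).

-- ===== PORT A =====
-- the casual_patterns list of A (B's frozenset is built from the same literals)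
def casualPatterns : List (List Char) :=
  ["hello", "hi", "hey", "good morning", "good afternoon", "good evening",
   "thank you", "thanks", "thank u", "thx", "appreciate", "grateful",
   "please", "excuse me", "sorry", "pardon",
   "bye", "goodbye", "see you", "take care", "have a good day",
   "ok", "okay", "alright", "sure", "yes", "no", "maybe",
   "i see", "understood", "got it", "makes sense"].map String.toList

def is_casual_message_py (message : String) : Bool :=
  let m := PySem.Chars.strip (PySem.Chars.lower message.toList)
  -- for pattern in casual_patterns: if == or startswith(p+' ') or startswith(p+','): return True
  if casualPatterns.any (fun p =>
      m == p || PySem.Chars.startswith m (p ++ [' ']) || PySem.Chars.startswith m (p ++ [','])) then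
    true
  else if decide ((PySem.Chars.split₀ m).length ≤ 2) &&
      casualPatterns.any (fun w => PySem.Chars.isIn w m) then
    true
  else
    false

-- ===== PORT B =====
-- _CASUAL = frozenset([...])
def casualSet : PySem.Set (List Char) := PySem.Set.ofList casualPatterns

def is_casual_message_py_alt (message : String) : Bool :=
  let m := PySem.Chars.strip (PySem.Chars.lower message.toList)
  let n := m.length
  -- any((i == n or m[i] in ' ,') and m[:i] in _CASUAL for i in range(n + 1));
  -- `m[i] in ' ,'` is ported as the two-character disjunction (i < n there, so getD never defaults)
  if (List.range (n + 1)).any (fun i =>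
      (i == n || (m.getD i ' ' == ' ' || m.getD i ' ' == ',')) &&
      casualSet.contains (m.take i)) then
    true
  else
    decide ((PySem.Chars.split₀ m).length ≤ 2) &&
      casualSet.any (fun w => PySem.Chars.isIn w m)

-- ===== PRECONDITION & SPEC =====
def Spec_is_casual_message_py (message : String) (out : Bool) : Prop := out = is_casual_message_py_alt message
instance (message : String) (out : Bool) : Decidable (Spec_is_casual_message_py message out) := by unfold Spec_is_casual_message_py; infer_instance

-- ===== CLAIM (what is proved, stated in full; the proofs are below) =====
def Claim_equal_is_casual_message_py : Prop := ∀ (message : String), Dom_is_casual_message_py message → Spec_is_casual_message_py message (is_casual_message_py message)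

-- ===== LEMMAS AND PROOFS =====

-- the frozenset keeps all 32 distinct patterns in order: as a list it is casualPatterns itself
theorem casualSet_eq : casualSet = casualPatterns := by decide

-- 'm starts with p followed by the character c' characterised by take/getElem?
theorem snoc_prefix_iff (m p : List Char) (c : Char) :
    p ++ [c] <+: m ↔ p.length < m.length ∧ m.take p.length = p ∧ m[p.length]? = some c := by
  constructor
  · intro h
    have hl : p.length + 1 ≤ m.length := by
      have := h.length_le; simpa using this
    have hlt : p.length < m.length := by omega
    have hpm : p <+: m := (List.prefix_append p [c]).trans h
    have hg : (p ++ [c])[p.length]'(by simp) = m[p.length]'hlt :=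
      h.getElem (by simp)
    have hgc : (p ++ [c])[p.length]'(by simp) = c := by
      rw [List.getElem_append_right (le_refl _)]; simp
    refine ⟨hlt, (List.prefix_iff_eq_take.mp hpm).symm, ?_⟩
    rw [List.getElem?_eq_getElem hlt, ← hg, hgc]
  · rintro ⟨h1, h2, h3⟩
    rw [List.prefix_iff_eq_take, show (p ++ [c]).length = p.length + 1 by simp,
        List.take_add_one, h2, h3]
    simp

-- phase 1 of A (some pattern matches at the front) ↔ phase 1 of B (some boundary prefix is a pattern)
theorem phase1_iff (L : List (List Char)) (m : List Char) :
    (∃ p ∈ L, m = p ∨ p ++ [' '] <+: m ∨ p ++ [','] <+: m) ↔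
    (∃ i, i < m.length + 1 ∧ (i = m.length ∨ m.getD i ' ' = ' ' ∨ m.getD i ' ' = ',') ∧ m.take i ∈ L) := by
  constructor
  · rintro ⟨p, hp, h | h | h⟩
    · exact ⟨m.length, by omega, Or.inl rfl, by simpa [h]⟩
    · obtain ⟨h1, h2, h3⟩ := (snoc_prefix_iff m p ' ').mp h
      exact ⟨p.length, by omega, Or.inr (Or.inl (by simp [List.getD, h3])),
             by rw [h2]; exact hp⟩
    · obtain ⟨h1, h2, h3⟩ := (snoc_prefix_iff m p ',').mp h
      exact ⟨p.length, by omega, Or.inr (Or.inr (by simp [List.getD, h3])),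
             by rw [h2]; exact hp⟩
  · rintro ⟨i, hi, hb, hmem⟩
    rcases hb with h | h | h
    · exact ⟨m.take i, hmem, Or.inl (by rw [h, List.take_length])⟩
    · by_cases hin : i < m.length
      · refine ⟨m.take i, hmem, Or.inr (Or.inl ?_)⟩
        rw [snoc_prefix_iff]
        have hlen : (m.take i).length = i := by simp [List.length_take]; omega
        refine ⟨by omega, by rw [hlen], ?_⟩
        rw [hlen, List.getElem?_eq_getElem hin]
        simp [List.getD, List.getElem?_eq_getElem hin] at h
        simp [h]
      · have : i = m.length := by omega
        exact ⟨m.take i, hmem, Or.inl (by rw [this, List.take_length])⟩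
    · by_cases hin : i < m.length
      · refine ⟨m.take i, hmem, Or.inr (Or.inr ?_)⟩
        rw [snoc_prefix_iff]
        have hlen : (m.take i).length = i := by simp [List.length_take]; omega
        refine ⟨by omega, by rw [hlen], ?_⟩
        rw [hlen, List.getElem?_eq_getElem hin]
        simp [List.getD, List.getElem?_eq_getElem hin] at h
        simp [h]
      · have : i = m.length := by omega
        exact ⟨m.take i, hmem, Or.inl (by rw [this, List.take_length])⟩

-- the two phase-1 Booleans agree
theorem phase1_bool_eq (m : List Char) :
    casualPatterns.any (fun p =>
      m == p || PySem.Chars.startswith m (p ++ [' ']) || PySem.Chars.startswith m (p ++ [','])) =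
    (List.range (m.length + 1)).any (fun i =>
      (i == m.length || (m.getD i ' ' == ' ' || m.getD i ' ' == ',')) &&
      casualSet.contains (m.take i)) := by
  rw [Bool.eq_iff_iff]
  simp only [List.any_eq_true, Bool.or_eq_true, Bool.and_eq_true, beq_iff_eq,
    PySem.Chars.startswith_iff, List.mem_range, PySem.Set.contains_iff, casualSet_eq]
  constructor
  · rintro ⟨p, hp, h⟩
    rw [or_assoc] at h
    obtain ⟨i, h1, h2, h3⟩ := (phase1_iff casualPatterns m).mp ⟨p, hp, h⟩
    exact ⟨i, h1, h2, h3⟩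
  · rintro ⟨i, h1, h2, h3⟩
    obtain ⟨p, hp, h⟩ := (phase1_iff casualPatterns m).mpr ⟨i, h1, h2, h3⟩
    rw [← or_assoc] at h
    exact ⟨p, hp, h⟩

-- ===== VERDICT (by name: the statement is the Claim_ definition above) =====
theorem is_casual_message_py_spec : Claim_equal_is_casual_message_py := by
  intro message _
  unfold Spec_is_casual_message_py is_casual_message_py is_casual_message_py_alt
  simp only [phase1_bool_eq, casualSet_eq]
  split
  · rfl
  · split <;> simp_all
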